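-- pv_equiv track=rewrite | github.com/pypi-data/pypi-mirror-357 | packages/ipfs-kit-py/ipfs_kit_py-0.3.0-py3-none-any.whl/ipfs_kit_py/streaming_security_integration.py | filter_notification_types_by_role
-- ===== SOURCE A (Python) =====
-- def filter_notification_types_by_role(notification_types, role, permissions):
--     """
--     Filter notification types based on user role and permissions.
--
--     Args:
--         notification_types: List of notification types requested
--         role: User role
--         permissions: User permissions dictionary
--
--     Returns:
--         List of allowed notification types
--     """
--     allowed_types = []
--
--     # Define permission rules for different notification types
--     notification_permissions = {
--         # System notifications require admin role or system permission
--         "system_metrics": lambda r, p: r == "admin" or p.get("system", False),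
--         "system_warning": lambda r, p: r == "admin" or p.get("system", False),
--         "system_error": lambda r, p: r == "admin" or p.get("system", False),
--
--         # WebRTC notifications require streaming permission or admin role
--         "webrtc_connection_created": lambda r, p: r == "admin" or p.get("streaming", False),
--         "webrtc_connection_established": lambda r, p: r == "admin" or p.get("streaming", False),
--         "webrtc_connection_closed": lambda r, p: r == "admin" or p.get("streaming", False),
--         "webrtc_stream_started": lambda r, p: r == "admin" or p.get("streaming", False),
--         "webrtc_stream_ended": lambda r, p: r == "admin" or p.get("streaming", False),
--         "webrtc_quality_changed": lambda r, p: r == "admin" or p.get("streaming", False),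
--         "webrtc_error": lambda r, p: r == "admin" or p.get("streaming", False),
--
--         # Cluster notifications require cluster permission or admin role
--         "cluster_peer_joined": lambda r, p: r == "admin" or p.get("cluster", False),
--         "cluster_peer_left": lambda r, p: r == "admin" or p.get("cluster", False),
--         "cluster_state_changed": lambda r, p: r == "admin" or p.get("cluster", False),
--         "cluster_pin_added": lambda r, p: r == "admin" or p.get("cluster", False),
--         "cluster_pin_removed": lambda r, p: r == "admin" or p.get("cluster", False),
--     }
--
--     # Process each notification type
--     for notification_type in notification_types:
--         # Public notifications are always allowed
--         if notification_type in ["content_added", "content_retrieved", "system_info", "custom_event"]: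
--             allowed_types.append(notification_type)
--             continue
--
--         # Check against permission rules
--         permission_rule = notification_permissions.get(notification_type)
--         if permission_rule:
--             if permission_rule(role, permissions):
--                 allowed_types.append(notification_type)
--             continue
--
--         # For types without specific rules, only admin can access
--         if role == "admin":
--             allowed_types.append(notification_type)
--
--     return allowed_types
-- ===== SOURCE B (Python) =====
-- _PUBLIC = frozenset({"content_added", "content_retrieved", "system_info", "custom_event"})
-- _SYSTEM = frozenset({"system_metrics", "system_warning", "system_error"})
-- _WEBRTC = frozenset({
--     "webrtc_connection_created", "webrtc_connection_established",
--     "webrtc_connection_closed", "webrtc_stream_started",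
--     "webrtc_stream_ended", "webrtc_quality_changed", "webrtc_error",
-- })
-- _CLUSTER = frozenset({
--     "cluster_peer_joined", "cluster_peer_left", "cluster_state_changed",
--     "cluster_pin_added", "cluster_pin_removed",
-- })
--
--
-- def filter_notification_types_by_role(notification_types, role, permissions):
--     # Admin may receive every notification type.
--     if role == "admin":
--         return list(notification_types)
--     # Non-admins: build the allowed set once, then filter in order.
--     allowed = set(_PUBLIC)
--     if permissions.get("system", False):
--         allowed |= _SYSTEM
--     if permissions.get("streaming", False):
--         allowed |= _WEBRTC
--     if permissions.get("cluster", False):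
--         allowed |= _CLUSTER
--     return [t for t in notification_types if t in allowed]
-- ===== Notes on version B (the rewrite author's own statement) =====
-- stated objective: simpler
-- what changed: Replaces A's per-item dispatch through a dictionary of 16 permission lambdas (with public-list and admin-fallback branches inside the loop) by an admin short-circuit plus one allowed set built once from the three permission bits, followed by a single order-preserving filter.
import Mathlib
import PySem

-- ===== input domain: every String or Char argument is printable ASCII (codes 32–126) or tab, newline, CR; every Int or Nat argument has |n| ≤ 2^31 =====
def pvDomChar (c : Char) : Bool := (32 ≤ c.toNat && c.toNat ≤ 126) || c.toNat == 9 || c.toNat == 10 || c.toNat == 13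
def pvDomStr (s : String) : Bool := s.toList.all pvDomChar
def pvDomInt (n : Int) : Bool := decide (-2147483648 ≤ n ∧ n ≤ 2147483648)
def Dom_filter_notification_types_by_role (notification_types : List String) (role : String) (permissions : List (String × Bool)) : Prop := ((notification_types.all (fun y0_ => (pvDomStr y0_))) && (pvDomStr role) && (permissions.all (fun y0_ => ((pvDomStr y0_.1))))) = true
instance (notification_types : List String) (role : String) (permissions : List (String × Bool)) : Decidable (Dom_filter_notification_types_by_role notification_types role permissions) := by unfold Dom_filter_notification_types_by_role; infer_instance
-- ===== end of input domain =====

-- B replaces A's per-item lambda-dictionary dispatch by one precomputed allowed set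
-- (admin short-circuited first) followed by a single order-preserving filter: simpler.

-- ===== PORT A =====
-- permissions.get(k, False) on the permissions dict (association list)
def pvPGet (p : List (String × Bool)) (k : String) : Bool :=
  PySem.Dict.getD (PySem.Dict.ofList p) k false

-- the dict of permission lambdas, ported as a key → Option rule chain (dict.get)
def pvNotifPerm (t : String) : Option (String → List (String × Bool) → Bool) :=
  if t == "system_metrics" then some (fun r p => r == "admin" || pvPGet p "system")
  else if t == "system_warning" then some (fun r p => r == "admin" || pvPGet p "system")
  else if t == "system_error" then some (fun r p => r == "admin" || pvPGet p "system")
  else if t == "webrtc_connection_created" then some (fun r p => r == "admin" || pvPGet p "streaming")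
  else if t == "webrtc_connection_established" then some (fun r p => r == "admin" || pvPGet p "streaming")
  else if t == "webrtc_connection_closed" then some (fun r p => r == "admin" || pvPGet p "streaming")
  else if t == "webrtc_stream_started" then some (fun r p => r == "admin" || pvPGet p "streaming")
  else if t == "webrtc_stream_ended" then some (fun r p => r == "admin" || pvPGet p "streaming")
  else if t == "webrtc_quality_changed" then some (fun r p => r == "admin" || pvPGet p "streaming")
  else if t == "webrtc_error" then some (fun r p => r == "admin" || pvPGet p "streaming")
  else if t == "cluster_peer_joined" then some (fun r p => r == "admin" || pvPGet p "cluster")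
  else if t == "cluster_peer_left" then some (fun r p => r == "admin" || pvPGet p "cluster")
  else if t == "cluster_state_changed" then some (fun r p => r == "admin" || pvPGet p "cluster")
  else if t == "cluster_pin_added" then some (fun r p => r == "admin" || pvPGet p "cluster")
  else if t == "cluster_pin_removed" then some (fun r p => r == "admin" || pvPGet p "cluster")
  else none

def filter_notification_types_by_role (notification_types : List String) (role : String) (permissions : List (String × Bool)) : List String :=
  notification_types.foldl (fun allowed_types notification_type =>
    if notification_type ∈ ["content_added", "content_retrieved", "system_info", "custom_event"] then
      allowed_types ++ [notification_type]
    else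
      match pvNotifPerm notification_type with
      | some permission_rule =>
          if permission_rule role permissions then allowed_types ++ [notification_type]
          else allowed_types
      | none =>
          if role == "admin" then allowed_types ++ [notification_type]
          else allowed_types) []

-- ===== PORT B =====
def pvPublicTypes : List String := ["content_added", "content_retrieved", "system_info", "custom_event"]
def pvSystemTypes : List String := ["system_metrics", "system_warning", "system_error"]
def pvWebrtcTypes : List String :=
  ["webrtc_connection_created", "webrtc_connection_established", "webrtc_connection_closed",
   "webrtc_stream_started", "webrtc_stream_ended", "webrtc_quality_changed", "webrtc_error"]
def pvClusterTypes : List String :=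
  ["cluster_peer_joined", "cluster_peer_left", "cluster_state_changed",
   "cluster_pin_added", "cluster_pin_removed"]

def filter_notification_types_by_role_alt (notification_types : List String) (role : String) (permissions : List (String × Bool)) : List String :=
  if role == "admin" then notification_types
  else
    let allowed : PySem.Set String := PySem.Set.ofList pvPublicTypes
    let allowed := if pvPGet permissions "system" then PySem.Set.union allowed pvSystemTypes else allowed
    let allowed := if pvPGet permissions "streaming" then PySem.Set.union allowed pvWebrtcTypes else allowed
    let allowed := if pvPGet permissions "cluster" then PySem.Set.union allowed pvClusterTypes else allowed
    notification_types.filter (fun t => PySem.Set.contains allowed t)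

-- ===== PRECONDITION & SPEC =====
def Spec_filter_notification_types_by_role (notification_types : List String) (role : String) (permissions : List (String × Bool)) (out : List String) : Prop := out = filter_notification_types_by_role_alt notification_types role permissions
instance (notification_types : List String) (role : String) (permissions : List (String × Bool)) (out : List String) : Decidable (Spec_filter_notification_types_by_role notification_types role permissions out) := by unfold Spec_filter_notification_types_by_role; infer_instance

-- ===== CLAIM (what is proved, stated in full; the proofs are below) =====
def Claim_equal_filter_notification_types_by_role : Prop := ∀ (notification_types : List String) (role : String) (permissions : List (String × Bool)), Dom_filter_notification_types_by_role notification_types role permissions → Spec_filter_notification_types_by_role notification_types role permissions (filter_notification_types_by_role notification_types role permissions)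

-- ===== LEMMAS AND PROOFS =====

-- A's per-item decision as a boolean predicate
def pvPredA (role : String) (permissions : List (String × Bool)) (t : String) : Bool :=
  if t ∈ ["content_added", "content_retrieved", "system_info", "custom_event"] then true
  else
    match pvNotifPerm t with
    | some rule => rule role permissions
    | none => role == "admin"

theorem pvA_eq_filter (nts : List String) (role : String) (perms : List (String × Bool)) :
    filter_notification_types_by_role nts role perms = nts.filter (pvPredA role perms) := by
  unfold filter_notification_types_by_role
  have h : (fun (allowed_types : List String) (nt : String) =>
      if nt ∈ ["content_added", "content_retrieved", "system_info", "custom_event"] then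
        allowed_types ++ [nt]
      else
        match pvNotifPerm nt with
        | some permission_rule =>
            if permission_rule role perms then allowed_types ++ [nt] else allowed_types
        | none =>
            if role == "admin" then allowed_types ++ [nt] else allowed_types)
      = (fun acc nt => if pvPredA role perms nt then acc ++ [nt] else acc) := by
    funext acc nt
    unfold pvPredA
    split
    · simp only [if_true]
    · cases h : pvNotifPerm nt <;> simp only
  rw [h, PySem.List.foldl_append_if_eq_filter]
  simp only [List.nil_append]

theorem pvNp_none (t : String) (h1 : t ∉ pvSystemTypes) (h2 : t ∉ pvWebrtcTypes)
    (h3 : t ∉ pvClusterTypes) : pvNotifPerm t = none := by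
  simp only [pvSystemTypes, pvWebrtcTypes, pvClusterTypes, List.mem_cons, not_or] at h1 h2 h3
  obtain ⟨a1, a2, a3⟩ := h1
  obtain ⟨b1, b2, b3, b4, b5, b6, b7⟩ := h2
  obtain ⟨c1, c2, c3, c4, c5⟩ := h3
  unfold pvNotifPerm
  simp [a1, a2, a3, b1, b2, b3, b4, b5, b6, b7, c1, c2, c3, c4, c5]

theorem pvPredA_admin (perms : List (String × Bool)) (t : String) :
    pvPredA "admin" perms t = true := by
  by_cases hp : t ∈ ["content_added", "content_retrieved", "system_info", "custom_event"]
  · simp [pvPredA, hp]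
  · by_cases hs : t ∈ pvSystemTypes
    · fin_cases hs <;> simp [pvPredA, pvNotifPerm]
    · by_cases hw : t ∈ pvWebrtcTypes
      · fin_cases hw <;> simp [pvPredA, pvNotifPerm]
      · by_cases hc : t ∈ pvClusterTypes
        · fin_cases hc <;> simp [pvPredA, pvNotifPerm]
        · simp [pvPredA, hp, pvNp_none t hs hw hc]

theorem pvPredA_nonadmin (role : String) (perms : List (String × Bool)) (t : String)
    (hrole : (role == "admin") = false) :
    pvPredA role perms t =
      (decide (t ∈ pvPublicTypes)
        || pvPGet perms "system" && decide (t ∈ pvSystemTypes)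
        || pvPGet perms "streaming" && decide (t ∈ pvWebrtcTypes)
        || pvPGet perms "cluster" && decide (t ∈ pvClusterTypes)) := by
  by_cases hp : t ∈ ["content_added", "content_retrieved", "system_info", "custom_event"]
  · fin_cases hp <;>
      simp [pvPredA, pvPublicTypes, pvSystemTypes, pvWebrtcTypes, pvClusterTypes]
  · by_cases hs : t ∈ pvSystemTypes
    · fin_cases hs <;>
        simp [pvPredA, pvNotifPerm, hrole, pvPublicTypes, pvSystemTypes, pvWebrtcTypes,
          pvClusterTypes]
    · by_cases hw : t ∈ pvWebrtcTypes
      · fin_cases hw <;>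
          simp [pvPredA, pvNotifPerm, hrole, pvPublicTypes, pvSystemTypes, pvWebrtcTypes,
            pvClusterTypes]
      · by_cases hc : t ∈ pvClusterTypes
        · fin_cases hc <;>
            simp [pvPredA, pvNotifPerm, hrole, pvPublicTypes, pvSystemTypes, pvWebrtcTypes,
              pvClusterTypes]
        · have hpub : t ∉ pvPublicTypes := hp
          simp [pvPredA, hp, pvNp_none t hs hw hc, hrole, hpub, hs, hw, hc]

theorem pvMem_ite_union (b : Bool) (a : PySem.Set String) (l : List String) (t : String) :
    (t ∈ (if b then PySem.Set.union a l else a)) ↔ (t ∈ a ∨ (b = true ∧ t ∈ l)) := by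
  cases b <;> simp [PySem.Set.mem_union]

theorem pvContains_eq (s : PySem.Set String) (t : String) :
    PySem.Set.contains s t = decide (t ∈ s) := by
  simp

theorem pvMem_allowed (b1 b2 b3 : Bool) (t : String) :
    PySem.Set.contains
      (let a := PySem.Set.ofList pvPublicTypes
       let a := if b1 then PySem.Set.union a pvSystemTypes else a
       let a := if b2 then PySem.Set.union a pvWebrtcTypes else a
       if b3 then PySem.Set.union a pvClusterTypes else a) t
    = (decide (t ∈ pvPublicTypes) || b1 && decide (t ∈ pvSystemTypes)
        || b2 && decide (t ∈ pvWebrtcTypes) || b3 && decide (t ∈ pvClusterTypes)) := by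
  rw [pvContains_eq]
  apply Bool.eq_iff_iff.mpr
  simp only [decide_eq_true_eq, pvMem_ite_union, PySem.Set.mem_ofList,
    Bool.or_eq_true, Bool.and_eq_true]

-- ===== VERDICT (by name: the statement is the Claim_ definition above) =====
theorem filter_notification_types_by_role_spec : Claim_equal_filter_notification_types_by_role := by
  intro nts role perms _
  unfold Spec_filter_notification_types_by_role
  rw [pvA_eq_filter]
  unfold filter_notification_types_by_role_alt
  by_cases hrole : (role == "admin") = true
  · have hr : role = "admin" := by simpa using hrole
    subst hr
    rw [if_pos hrole]
    apply List.filter_eq_self.mpr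
    intro t _
    exact pvPredA_admin perms t
  · rw [Bool.not_eq_true] at hrole
    rw [if_neg (by simp [hrole])]
    apply List.filter_congr
    intro t _
    rw [pvPredA_nonadmin role perms t hrole, ← pvMem_allowed]
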